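-- pv_equiv track=rewrite | github.com/premkumarteli/Network | shared/intel/domain_intelligence.py | is_sensitive_destination
-- ===== SOURCE A (Python) =====
-- SENSITIVE_DOMAINS = [
--     "paypal.com",
--     "stripe.com",
--     "squareup.com",
--     "shopify.com",
--     "wellsfargo.com",
--     "chase.com",
--     "bankofamerica.com",
--     "citibank.com",
--     "capitalone.com",
--     "usbank.com",
--     "discover.com",
--     "appleid.apple.com",
--     "id.apple.com",
--     "account.apple.com",
--     "accounts.google.com",
--     "mail.google.com",
--     "drive.google.com",
--     "calendar.google.com",
--     "login.microsoftonline.com",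
--     "account.microsoft.com",
--     "login.live.com",
--     "auth0.com",
--     "okta.com",
--     "onelogin.com",
--     "pingidentity.com",
--     "duo.com",
-- ]
--
-- def is_sensitive_destination(domain: str) -> bool:
--     if not domain:
--         return False
--
--     normalized = domain.lower().strip()
--     for marker in SENSITIVE_DOMAINS:
--         marker = marker.lower().strip()
--         if not marker:
--             continue
--         if normalized == marker or normalized.endswith(f".{marker}"):
--             return True
--     return False
-- ===== SOURCE B (Python) =====
-- SENSITIVE_DOMAINS = [
--     "paypal.com",
--     "stripe.com",
--     "squareup.com",
--     "shopify.com",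
--     "wellsfargo.com",
--     "chase.com",
--     "bankofamerica.com",
--     "citibank.com",
--     "capitalone.com",
--     "usbank.com",
--     "discover.com",
--     "appleid.apple.com",
--     "id.apple.com",
--     "account.apple.com",
--     "accounts.google.com",
--     "mail.google.com",
--     "drive.google.com",
--     "calendar.google.com",
--     "login.microsoftonline.com",
--     "account.microsoft.com",
--     "login.live.com",
--     "auth0.com",
--     "okta.com",
--     "onelogin.com",
--     "pingidentity.com",
--     "duo.com",
-- ]
--
-- # Normalized markers, computed once: set lookup instead of scanning the list.
-- _MARKERS = frozenset(m.lower().strip() for m in SENSITIVE_DOMAINS if m.lower().strip())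
--
-- def is_sensitive_destination(domain: str) -> bool:
--     if not domain:
--         return False
--     suffix = domain.lower().strip()
--     # Walk the dot-boundary suffixes of the domain and look each one up in the set.
--     while True:
--         if suffix in _MARKERS:
--             return True
--         dot = suffix.find(".")
--         if dot == -1:
--             return False
--         suffix = suffix[dot + 1:]
-- ===== Notes on version B (the rewrite author's own statement) =====
-- stated objective: alternative
-- what changed: Instead of scanning the marker list with endswith for each marker, B precomputes a frozenset of normalized markers once and walks the domain's dot-boundary suffixes, doing one set lookup per label.
import Mathlib
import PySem

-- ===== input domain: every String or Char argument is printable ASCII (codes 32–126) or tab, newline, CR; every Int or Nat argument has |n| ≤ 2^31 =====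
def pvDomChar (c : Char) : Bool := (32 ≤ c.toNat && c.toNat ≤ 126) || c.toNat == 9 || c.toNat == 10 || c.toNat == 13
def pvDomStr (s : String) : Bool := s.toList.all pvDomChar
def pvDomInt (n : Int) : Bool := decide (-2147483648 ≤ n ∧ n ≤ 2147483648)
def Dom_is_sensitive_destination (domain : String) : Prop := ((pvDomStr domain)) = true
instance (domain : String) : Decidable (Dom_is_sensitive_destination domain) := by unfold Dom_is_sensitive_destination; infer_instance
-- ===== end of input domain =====

-- B walks the domain's dot-boundary suffixes and looks each up in a precomputed set of
-- normalized markers, instead of A's scan of the marker list with endswith (alternative).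

-- ===== PORT A =====
def SENSITIVE_DOMAINS : List String := [
  "paypal.com", "stripe.com", "squareup.com", "shopify.com", "wellsfargo.com",
  "chase.com", "bankofamerica.com", "citibank.com", "capitalone.com", "usbank.com",
  "discover.com", "appleid.apple.com", "id.apple.com", "account.apple.com",
  "accounts.google.com", "mail.google.com", "drive.google.com", "calendar.google.com",
  "login.microsoftonline.com", "account.microsoft.com", "login.live.com",
  "auth0.com", "okta.com", "onelogin.com", "pingidentity.com", "duo.com"]

-- marker.lower().strip() (strings handled as List Char throughout)
def markerNorm (marker : String) : List Char :=
  PySem.Chars.strip (PySem.Chars.lower marker.toList)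

-- A's for-loop with early return
def aLoop (normalized : List Char) : List String → Bool
  | [] => false
  | marker :: rest =>
    let m := markerNorm marker
    if m.isEmpty then aLoop normalized rest
    else if normalized == m || PySem.Chars.endswith normalized ('.' :: m) then true
    else aLoop normalized rest

def is_sensitive_destination (domain : String) : Bool :=
  if domain == "" then false
  else aLoop (PySem.Chars.strip (PySem.Chars.lower domain.toList)) SENSITIVE_DOMAINS

-- ===== PORT B =====
-- _MARKERS = frozenset(m.lower().strip() for m in SENSITIVE_DOMAINS if m.lower().strip())
def MARKERS : PySem.Set (List Char) :=
  PySem.Set.ofList ((SENSITIVE_DOMAINS.map markerNorm).filter (fun m => !m.isEmpty))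

-- suffix.find(".") followed by suffix[dot+1:]: the part after the FIRST '.', none if no '.'
def afterFirstDot : List Char → Option (List Char)
  | [] => none
  | c :: rest => if c == '.' then some rest else afterFirstDot rest

theorem afterFirstDot_length : ∀ {s t : List Char}, afterFirstDot s = some t → t.length < s.length := by
  intro s
  induction s with
  | nil => intro t h; simp [afterFirstDot] at h
  | cons c rest ih =>
    intro t hyp
    by_cases hc : c == '.'
    · simp [afterFirstDot, hc] at hyp; subst hyp; simp
    · simp [afterFirstDot, hc] at hyp
      exact Nat.lt_trans (ih hyp) (by simp)

-- B's while loop: check the current suffix, then drop through the first dot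
def bLoop (suffix : List Char) : Bool :=
  if PySem.Set.contains MARKERS suffix then true
  else
    match h : afterFirstDot suffix with
    | none => false
    | some t => bLoop t
termination_by suffix.length
decreasing_by exact afterFirstDot_length h

def is_sensitive_destination_alt (domain : String) : Bool :=
  if domain == "" then false
  else bLoop (PySem.Chars.strip (PySem.Chars.lower domain.toList))

-- ===== PRECONDITION & SPEC =====
def Spec_is_sensitive_destination (domain : String) (out : Bool) : Prop := out = is_sensitive_destination_alt domain
instance (domain : String) (out : Bool) : Decidable (Spec_is_sensitive_destination domain out) := by unfold Spec_is_sensitive_destination; infer_instance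

-- ===== CLAIM (what is proved, stated in full; the proofs are below) =====
def Claim_equal_is_sensitive_destination : Prop := ∀ (domain : String), Dom_is_sensitive_destination domain → Spec_is_sensitive_destination domain (is_sensitive_destination domain)

-- ===== LEMMAS AND PROOFS =====

-- the suffixes of n that begin right after a '.'
def dotTails : List Char → List (List Char)
  | [] => []
  | c :: rest => if c = '.' then rest :: dotTails rest else dotTails rest

theorem endswith_dot_iff (n m : List Char) :
    PySem.Chars.endswith n ('.' :: m) = true ↔ m ∈ dotTails n := by
  induction n with
  | nil =>
    simp [PySem.Chars.endswith_iff, dotTails, List.suffix_nil]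
  | cons c rest ih =>
    rw [PySem.Chars.endswith_iff, List.suffix_cons_iff]
    rw [PySem.Chars.endswith_iff] at ih
    constructor
    · rintro (h | h)
      · obtain ⟨hc, hm⟩ := List.cons.inj h
        simp [dotTails, ← hc, ← hm]
      · by_cases hc : c = '.' <;> simp [dotTails, hc, ih.mp h]
    · intro h
      by_cases hc : c = '.'
      · simp [dotTails, hc] at h
        rcases h with h | h
        · exact Or.inl (by rw [h, hc])
        · exact Or.inr (ih.mpr h)
      · simp [dotTails, hc] at h
        exact Or.inr (ih.mpr h)

theorem dotTails_none {n : List Char} (h : afterFirstDot n = none) : dotTails n = [] := by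
  induction n with
  | nil => simp [dotTails]
  | cons c rest ih =>
    by_cases hc : c = '.'
    · simp [afterFirstDot, hc] at h
    · simp [afterFirstDot, hc] at h
      simp [dotTails, hc, ih h]

theorem dotTails_some {n t : List Char} (h : afterFirstDot n = some t) :
    dotTails n = t :: dotTails t := by
  induction n with
  | nil => simp [afterFirstDot] at h
  | cons c rest ih =>
    by_cases hc : c = '.'
    · simp [afterFirstDot, hc] at h
      simp [dotTails, hc, h]
    · simp [afterFirstDot, hc] at h
      simp [dotTails, hc, ih h]

theorem bLoop_eq (n : List Char) :
    bLoop n = (PySem.Set.contains MARKERS n ||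
               (dotTails n).any (fun t => PySem.Set.contains MARKERS t)) := by
  fun_induction bLoop n with
  | case1 n h => rw [h, Bool.true_or]
  | case2 n h hnone =>
    rw [Bool.not_eq_true] at h
    rw [h, Bool.false_or, dotTails_none hnone, List.any_nil]
  | case3 n h t hsome ih =>
    rw [Bool.not_eq_true] at h
    rw [h]
    rw [Bool.false_or]
    rw [dotTails_some hsome]
    rw [List.any_cons]
    rw [ih]

theorem aLoop_eq (n : List Char) (ms : List String) :
    aLoop n ms = ms.any (fun marker =>
      !(markerNorm marker).isEmpty &&
        (n == markerNorm marker || PySem.Chars.endswith n ('.' :: markerNorm marker))) := by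
  induction ms with
  | nil => rfl
  | cons marker rest ih =>
    rw [List.any_cons, ← ih]
    show (if (markerNorm marker).isEmpty then aLoop n rest
          else if n == markerNorm marker || PySem.Chars.endswith n ('.' :: markerNorm marker) then true
          else aLoop n rest) = _
    by_cases he : (markerNorm marker).isEmpty
    · rw [if_pos he, he, Bool.not_true, Bool.false_and, Bool.false_or]
    · rw [Bool.not_eq_true] at he
      rw [if_neg (by rw [he]; exact Bool.false_ne_true), he, Bool.not_false, Bool.true_and]
      by_cases hm : (n == markerNorm marker || PySem.Chars.endswith n ('.' :: markerNorm marker)) = true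
      · rw [if_pos hm, hm, Bool.true_or]
      · rw [Bool.not_eq_true] at hm
        rw [if_neg (by rw [hm]; exact Bool.false_ne_true), hm, Bool.false_or]

theorem loops_agree (n : List Char) : aLoop n SENSITIVE_DOMAINS = bLoop n := by
  rw [aLoop_eq, bLoop_eq, Bool.eq_iff_iff]
  simp only [List.any_eq_true, Bool.and_eq_true, Bool.or_eq_true, Bool.not_eq_eq_eq_not,
    Bool.not_true, beq_iff_eq, PySem.Set.contains_iff, MARKERS, PySem.Set.mem_ofList,
    List.mem_filter, List.mem_map, endswith_dot_iff]
  constructor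
  · rintro ⟨marker, hmem, hne, h | h⟩
    · exact Or.inl ⟨⟨marker, hmem, h.symm⟩, by rw [h]; exact hne⟩
    · exact Or.inr ⟨markerNorm marker, h, ⟨marker, hmem, rfl⟩, hne⟩
  · rintro (⟨⟨marker, hmem, hm⟩, hne⟩ | ⟨t, ht, ⟨marker, hmem, hm⟩, hne⟩)
    · exact ⟨marker, hmem, by rw [hm]; exact hne, Or.inl hm.symm⟩
    · exact ⟨marker, hmem, by rw [hm]; exact hne, Or.inr (by rw [hm]; exact ht)⟩

-- ===== VERDICT (by name: the statement is the Claim_ definition above) =====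
theorem is_sensitive_destination_spec : Claim_equal_is_sensitive_destination := by
  intro domain _
  unfold Spec_is_sensitive_destination is_sensitive_destination is_sensitive_destination_alt
  by_cases h : domain == ""
  · simp [h]
  · simp only [h, if_false, Bool.false_eq_true]
    exact loops_agree _
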